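-- pv_equiv track=rewrite | github.com/GodInLove/operondemmoDB | app/home/operon.py | get_condition_str_rockhopper
-- ===== SOURCE A (Python) =====
-- def get_condition_str_rockhopper(download_path_list, paired_or_not_list, all_srr_list):
--     record_condition = ""
--     condition_list = []
--     i_iter = 0
--     while i_iter < len(all_srr_list):
--         condition = download_path_list[i_iter].split("/")[-1]
--         if condition != record_condition:
--             condition_list.append([])
--             record_condition = condition
--         if paired_or_not_list[i_iter] == 1:
--             condition_list[-1].append(download_path_list[i_iter] + "/" + all_srr_list[i_iter] + "_1.fastq.gz%"
--                                       + download_path_list[i_iter] + "/" + all_srr_list[i_iter] + "_2.fastq.gz")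
--         else:
--             condition_list[-1].append(download_path_list[i_iter] + "/" + all_srr_list[i_iter] + ".fastq.gz")
--         i_iter = i_iter + 1
--     new_condition_list = []
--     for con in condition_list:
--         new_condition_list.append(",".join(con))
--     condition_str = " ".join(new_condition_list)
--     return condition_str
-- ===== SOURCE B (Python) =====
-- def get_condition_str_rockhopper(download_path_list, paired_or_not_list, all_srr_list):
--     n = len(all_srr_list)
--     keys = [download_path_list[i].split("/")[-1] for i in range(n)]
--     entries = []
--     for i in range(n):
--         base = download_path_list[i] + "/" + all_srr_list[i]
--         if paired_or_not_list[i] == 1: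
--             entries.append(base + "_1.fastq.gz%" + base + "_2.fastq.gz")
--         else:
--             entries.append(base + ".fastq.gz")
--     if n == 0:
--         return ""
--     seps = [" " if cur != prev else "," for cur, prev in zip(keys[1:], keys)]
--     return entries[0] + "".join(s + e for s, e in zip(seps, entries[1:]))
-- ===== Notes on version B (the rewrite author's own statement) =====
-- stated objective: alternative
-- what changed: Replaces A's stateful grouping (record_condition tracking plus appending into the last group of a mutable list-of-lists, then a ','-join per group and a ' '-join over groups) with three staged vector passes and no grouping at all: a keys list, an entries list, a separators list computed by zipping the keys list with its own tail (' ' at a key change, ',' otherwise), and one final concatenation.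
-- crash fix: A raises IndexError whenever the first download path's last '/'-component is the empty string (record_condition starts as "", so no group exists when condition_list[-1] is first accessed); B returns the normally separator-joined condition string there. — e.g. on get_condition_str_rockhopper(["a/"], [0], ["s"]): A raises IndexError, B returns "a//s.fastq.gz"
import Mathlib
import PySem

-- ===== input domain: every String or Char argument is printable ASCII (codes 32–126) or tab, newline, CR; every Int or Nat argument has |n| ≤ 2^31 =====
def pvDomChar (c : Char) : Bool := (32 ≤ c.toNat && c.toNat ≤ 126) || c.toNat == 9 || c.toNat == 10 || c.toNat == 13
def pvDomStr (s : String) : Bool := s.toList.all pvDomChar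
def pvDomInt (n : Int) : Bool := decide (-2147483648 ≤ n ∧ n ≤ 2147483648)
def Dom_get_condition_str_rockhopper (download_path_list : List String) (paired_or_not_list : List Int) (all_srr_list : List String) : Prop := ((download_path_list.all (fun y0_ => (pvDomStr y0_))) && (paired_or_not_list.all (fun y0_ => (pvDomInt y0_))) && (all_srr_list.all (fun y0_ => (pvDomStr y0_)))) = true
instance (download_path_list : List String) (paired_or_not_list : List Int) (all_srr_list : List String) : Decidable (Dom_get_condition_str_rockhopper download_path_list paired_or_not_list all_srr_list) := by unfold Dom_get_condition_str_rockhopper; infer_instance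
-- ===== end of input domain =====

-- B replaces A's stateful grouping (record_condition + append into the last group of a mutable
-- list-of-lists, then two joins) by three staged vector passes with NO grouping at all: keys,
-- entries, then a separator (" " at an adjacent-key change, "," otherwise) computed by zipping
-- the keys list with its own tail, and ONE final concatenation. Alternative decomposition, same
-- cost; A mutates nothing.

-- condition = download_path_list[i].split("/")[-1]  (identical text in both Pythons)
def pvKey (s : String) : String := ((PySem.Str.split? s "/").getD []).getLastD ""

-- ===== PORT A =====
-- the formatted entry for one index (A's two inline concatenations)
def pvEntry (d s : String) (p : Int) : String :=
  if p == 1 then d ++ "/" ++ s ++ "_1.fastq.gz%" ++ d ++ "/" ++ s ++ "_2.fastq.gz"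
  else d ++ "/" ++ s ++ ".fastq.gz"

-- condition_list[-1].append(e); on an empty list Python raises IndexError (excluded by Pre_)
def pvAppendLast (cl : List (List String)) (e : String) : List (List String) :=
  match cl with
  | [] => []
  | [g] => [g ++ [e]]
  | g :: rest => g :: pvAppendLast rest e

-- the while loop: state = (record_condition, condition_list); fuel counts remaining iterations
def pvLoopA (dl : List String) (pl : List Int) (sl : List String) :
    Nat → Nat → String → List (List String) → List (List String)
  | 0, _, _, cl => cl
  | fuel+1, i, record, cl =>
    let condition := pvKey (PySem.List.pyGetD dl (i : Int) "")
    let e := pvEntry (PySem.List.pyGetD dl (i : Int) "") (PySem.List.pyGetD sl (i : Int) "")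
               (PySem.List.pyGetD pl (i : Int) 0)
    if condition ≠ record then
      pvLoopA dl pl sl fuel (i+1) condition (pvAppendLast (cl ++ [[]]) e)
    else
      pvLoopA dl pl sl fuel (i+1) record (pvAppendLast cl e)

def get_condition_str_rockhopper (download_path_list : List String) (paired_or_not_list : List Int) (all_srr_list : List String) : String :=
  let condition_list := pvLoopA download_path_list paired_or_not_list all_srr_list all_srr_list.length 0 "" []
  let new_condition_list := condition_list.map (fun con => PySem.Str.join "," con)
  PySem.Str.join " " new_condition_list

-- ===== PORT B =====
-- B's entry, written as Source B writes it: base = d + "/" + s first, then the suffixes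
def pvEntryB (d s : String) (p : Int) : String :=
  let base := d ++ "/" ++ s
  if p == 1 then base ++ "_1.fastq.gz%" ++ base ++ "_2.fastq.gz"
  else base ++ ".fastq.gz"

def get_condition_str_rockhopper_alt (download_path_list : List String) (paired_or_not_list : List Int) (all_srr_list : List String) : String :=
  let n := all_srr_list.length
  let keys := (PySem.List.pyRange 0 (n : Int) 1).map
      (fun i => pvKey (PySem.List.pyGetD download_path_list i ""))
  let entries := (PySem.List.pyRange 0 (n : Int) 1).map
      (fun i => pvEntryB (PySem.List.pyGetD download_path_list i "")
        (PySem.List.pyGetD all_srr_list i "") (PySem.List.pyGetD paired_or_not_list i 0))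
  if n == 0 then ""
  else
    let seps := ((PySem.List.slice keys (some 1) none).zip keys).map
        (fun p => if p.1 ≠ p.2 then " " else ",")
    PySem.List.pyGetD entries (0 : Int) "" ++
      PySem.Str.join "" ((seps.zip (PySem.List.slice entries (some 1) none)).map (fun p => p.1 ++ p.2))

-- ===== PRECONDITION & SPEC =====
-- Pre_ excludes exactly the inputs where A raises IndexError: an index beyond download_path_list
-- or paired_or_not_list, or a first download path whose last "/"-component is "" (condition_list[-1] on []).
def Pre_get_condition_str_rockhopper (download_path_list : List String) (paired_or_not_list : List Int) (all_srr_list : List String) : Prop :=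
  all_srr_list.length ≤ download_path_list.length ∧
  all_srr_list.length ≤ paired_or_not_list.length ∧
  (all_srr_list ≠ [] → ((PySem.Str.split? (download_path_list.getD 0 "") "/").getD []).getLastD "" ≠ "")

instance (download_path_list : List String) (paired_or_not_list : List Int) (all_srr_list : List String) : Decidable (Pre_get_condition_str_rockhopper download_path_list paired_or_not_list all_srr_list) := by unfold Pre_get_condition_str_rockhopper; infer_instance

def pvWitness_get_condition_str_rockhopper : List String × List Int × List String :=
  (["data/c1", "data/c1", "data/c2"], [1, 0, 0], ["s1", "s2", "s3"])

-- A raises IndexError whenever the first download path's last "/"-component is the empty string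
-- (record_condition starts as "", so no group exists when condition_list[-1] is first accessed);
-- B returns the normally separator-joined condition string there.
def Raises_get_condition_str_rockhopper (download_path_list : List String) (paired_or_not_list : List Int) (all_srr_list : List String) : Prop :=
  all_srr_list.length ≤ download_path_list.length ∧
  all_srr_list.length ≤ paired_or_not_list.length ∧
  all_srr_list ≠ [] ∧
  ((PySem.Str.split? (download_path_list.getD 0 "") "/").getD []).getLastD "" = ""

instance (download_path_list : List String) (paired_or_not_list : List Int) (all_srr_list : List String) : Decidable (Raises_get_condition_str_rockhopper download_path_list paired_or_not_list all_srr_list) := by unfold Raises_get_condition_str_rockhopper; infer_instance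

def pvRaiseWitness_get_condition_str_rockhopper : List String × List Int × List String :=
  (["a/"], [0], ["s"])

def pvRaiseWitnessOut_get_condition_str_rockhopper : String := "a//s.fastq.gz"

def Spec_get_condition_str_rockhopper (download_path_list : List String) (paired_or_not_list : List Int) (all_srr_list : List String) (out : String) : Prop := out = get_condition_str_rockhopper_alt download_path_list paired_or_not_list all_srr_list
instance (download_path_list : List String) (paired_or_not_list : List Int) (all_srr_list : List String) (out : String) : Decidable (Spec_get_condition_str_rockhopper download_path_list paired_or_not_list all_srr_list out) := by unfold Spec_get_condition_str_rockhopper; infer_instance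

-- ===== CLAIM (what is proved, stated in full; the proofs are below) =====
def Claim_equal_get_condition_str_rockhopper : Prop := ∀ (download_path_list : List String) (paired_or_not_list : List Int) (all_srr_list : List String), Dom_get_condition_str_rockhopper download_path_list paired_or_not_list all_srr_list → Pre_get_condition_str_rockhopper download_path_list paired_or_not_list all_srr_list → Spec_get_condition_str_rockhopper download_path_list paired_or_not_list all_srr_list (get_condition_str_rockhopper download_path_list paired_or_not_list all_srr_list)

def Claim_raises_get_condition_str_rockhopper : Prop := (∀ (download_path_list : List String) (paired_or_not_list : List Int) (all_srr_list : List String), Dom_get_condition_str_rockhopper download_path_list paired_or_not_list all_srr_list → Raises_get_condition_str_rockhopper download_path_list paired_or_not_list all_srr_list → ¬ Pre_get_condition_str_rockhopper download_path_list paired_or_not_list all_srr_list) ∧ (Dom_get_condition_str_rockhopper (pvRaiseWitness_get_condition_str_rockhopper.1) (pvRaiseWitness_get_condition_str_rockhopper.2.1) (pvRaiseWitness_get_condition_str_rockhopper.2.2) ∧ Raises_get_condition_str_rockhopper (pvRaiseWitness_get_condition_str_rockhopper.1) (pvRaiseWitness_get_condition_str_rockhopper.2.1) (pvRaiseWitness_get_condition_str_rockhopper.2.2)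 ∧ get_condition_str_rockhopper_alt (pvRaiseWitness_get_condition_str_rockhopper.1) (pvRaiseWitness_get_condition_str_rockhopper.2.1) (pvRaiseWitness_get_condition_str_rockhopper.2.2) = pvRaiseWitnessOut_get_condition_str_rockhopper)

-- ===== LEMMAS AND PROOFS =====

theorem pvEntryB_eq (d s : String) (p : Int) : pvEntryB d s p = pvEntry d s p := by
  unfold pvEntry pvEntryB
  split_ifs <;> simp [String.append_assoc]

-- string-level join facts (derived from the PySem.Chars.join_* lemmas)
theorem strjoin_nil (sep : String) : PySem.Str.join sep [] = "" := by
  simp [PySem.Str.join, PySem.Chars.join_nil]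

theorem strjoin_singleton (sep p : String) : PySem.Str.join sep [p] = p := by
  simp [PySem.Str.join, PySem.Chars.join_singleton]

theorem strjoin_cons_cons (sep p q : String) (rest : List String) :
    PySem.Str.join sep (p :: q :: rest) = p ++ sep ++ PySem.Str.join sep (q :: rest) := by
  have h := PySem.Chars.join_cons_cons sep.toList p.toList q.toList (rest.map String.toList)
  simp [PySem.Str.join, h]
  exact String.append_assoc.symm

theorem strjoin_absorb (sep a b : String) (m : List String) :
    PySem.Str.join sep ((a ++ b) :: m) = a ++ PySem.Str.join sep (b :: m) := by
  cases m with
  | nil => rw [strjoin_singleton, strjoin_singleton]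
  | cons c m' =>
    rw [strjoin_cons_cons, strjoin_cons_cons]
    simp [String.append_assoc]

theorem strjoin_empty_cons (p : String) (m : List String) :
    PySem.Str.join "" (p :: m) = p ++ PySem.Str.join "" m := by
  cases m with
  | nil => rw [strjoin_singleton, strjoin_nil]; exact String.append_empty.symm
  | cons q m' => rw [strjoin_cons_cons]; simp [String.append_empty]

-- A's per-item state transition, as a fold step over (key, entry) pairs
def pvStep (st : String × List (List String)) (p : String × String) : String × List (List String) :=
  if p.1 ≠ st.1 then (p.1, pvAppendLast (st.2 ++ [[]]) p.2)
  else (st.1, pvAppendLast st.2 p.2)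

-- the (key, entry) pair at every index, as one list (proof-side view of A's loop input)
def pvPairs (dl : List String) (pl : List Int) (sl : List String) : Nat → Nat → List (String × String)
  | 0, _ => []
  | fuel+1, i =>
    (pvKey (PySem.List.pyGetD dl (i : Int) ""),
     pvEntry (PySem.List.pyGetD dl (i : Int) "") (PySem.List.pyGetD sl (i : Int) "")
       (PySem.List.pyGetD pl (i : Int) 0)) :: pvPairs dl pl sl fuel (i+1)

-- consecutive runs of equal keys (proof-side view of A's condition_list)
def pvRuns : List (String × String) → List (String × List String)
  | [] => []
  | (k, e) :: rest =>
    match pvRuns rest with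
    | (k', es) :: rs => if k = k' then (k, e :: es) :: rs else (k, [e]) :: (k', es) :: rs
    | [] => [(k, [e])]

-- merging the pending run (record r, open group g) with the runs of the remaining pairs
def pvGlue (r : String) (g : List String) (rs : List (String × List String)) : List (List String) :=
  match rs with
  | (k, es) :: rest => if k = r then (g ++ es) :: rest.map Prod.snd else g :: es :: rest.map Prod.snd
  | [] => [g]

-- the separator-joined tail after an initial entry, r = the previous key (B's view of the answer)
def pvSepTail (r : String) : List (String × String) → String
  | [] => ""
  | (k, e) :: rest => (if k ≠ r then " " else ",") ++ (e ++ pvSepTail k rest)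

theorem pvStep_eq (r k e : String) (cl : List (List String)) :
    pvStep (r, cl) (k, e) =
      if k ≠ r then (k, pvAppendLast (cl ++ [[]]) e) else (r, pvAppendLast cl e) := rfl

theorem pvAppendLast_cons (c : List String) (l : List (List String)) (e : String) (h : l ≠ []) :
    pvAppendLast (c :: l) e = c :: pvAppendLast l e := by
  cases l with
  | nil => exact absurd rfl h
  | cons x xs => rfl

theorem pvAppendLast_append (cl0 : List (List String)) (g : List String) (e : String) :
    pvAppendLast (cl0 ++ [g]) e = cl0 ++ [g ++ [e]] := by
  induction cl0 with
  | nil => rfl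
  | cons c cs ih =>
    rw [List.cons_append, pvAppendLast_cons c (cs ++ [g]) e (by simp), ih, List.cons_append]

theorem pvLoopA_eq_foldl (dl : List String) (pl : List Int) (sl : List String) :
    ∀ (fuel i : Nat) (r : String) (cl : List (List String)),
      pvLoopA dl pl sl fuel i r cl = ((pvPairs dl pl sl fuel i).foldl pvStep (r, cl)).2 := by
  intro fuel
  induction fuel with
  | zero => intro i r cl; rfl
  | succ f ih =>
    intro i r cl
    rw [pvLoopA, pvPairs, List.foldl_cons, pvStep_eq]
    by_cases h : pvKey (PySem.List.pyGetD dl (i : Int) "") ≠ r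
    · rw [if_pos h, if_pos h, ih]
    · rw [if_neg h, if_neg h, ih]

theorem pvGlue_step (k e r : String) (g : List String) (rs : List (String × List String)) :
    (if k ≠ r then (g :: pvGlue k [e] rs) else pvGlue r (g ++ [e]) rs) =
      pvGlue r g (match rs with
        | (k', es) :: rs' => if k = k' then (k, e :: es) :: rs' else (k, [e]) :: (k', es) :: rs'
        | [] => [(k, [e])]) := by
  cases rs with
  | nil =>
    by_cases hkr : k = r <;> simp [pvGlue, hkr]
  | cons p rs' =>
    obtain ⟨k', es⟩ := p
    by_cases hkk : k = k'
    · subst hkk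
      by_cases hkr : k = r <;> simp [pvGlue, hkr]
    · have hkk' : ¬ k' = k := fun h => hkk h.symm
      by_cases hkr : k = r
      · subst hkr
        have hkr' : ¬ k' = k := hkk'
        simp [pvGlue, hkk, hkr']
      · simp [pvGlue, hkk, hkk', hkr]

theorem foldl_step_glue :
    ∀ (ps : List (String × String)) (r : String) (g : List String) (cl0 : List (List String)),
      ((ps.foldl pvStep (r, cl0 ++ [g]))).2 = cl0 ++ pvGlue r g (pvRuns ps) := by
  intro ps
  induction ps with
  | nil => intro r g cl0; simp [pvGlue, pvRuns]
  | cons p rest ih =>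
    intro r g cl0
    obtain ⟨k, e⟩ := p
    rw [List.foldl_cons, pvStep_eq, pvRuns, ← pvGlue_step k e r g (pvRuns rest)]
    by_cases h : k ≠ r
    · rw [if_pos h, if_pos h]
      have h1 : pvAppendLast (cl0 ++ [g] ++ [[]]) e = (cl0 ++ [g]) ++ [[e]] := by
        simpa using pvAppendLast_append (cl0 ++ [g]) [] e
      rw [h1, ih k [e] (cl0 ++ [g]), List.append_assoc]
      rfl
    · rw [if_neg h, if_neg h, pvAppendLast_append cl0 g e, ih r (g ++ [e]) cl0]

theorem pvGlue_head (k e : String) (ps : List (String × String)) :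
    pvGlue k [e] (pvRuns ps) = (pvRuns ((k, e) :: ps)).map Prod.snd := by
  rw [pvRuns]
  cases hr : pvRuns ps with
  | nil => simp [pvGlue]
  | cons p rs' =>
    obtain ⟨k', es⟩ := p
    by_cases hkk : k = k'
    · subst hkk; simp [pvGlue]
    · have hkk' : ¬ k' = k := fun h => hkk h.symm
      simp [pvGlue, hkk, hkk']

theorem pvLoop_runs (dl : List String) (pl : List Int) (sl : List String) (f i : Nat) (r : String)
    (h : pvKey (PySem.List.pyGetD dl ((i : Nat) : Int) "") ≠ r) :
    pvLoopA dl pl sl (f + 1) i r [] = (pvRuns (pvPairs dl pl sl (f + 1) i)).map Prod.snd := by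
  rw [pvLoopA, if_pos h]
  rw [show pvAppendLast (([] : List (List String)) ++ [[]])
        (pvEntry (PySem.List.pyGetD dl ((i : Nat) : Int) "") (PySem.List.pyGetD sl ((i : Nat) : Int) "")
          (PySem.List.pyGetD pl ((i : Nat) : Int) 0)) =
      ([] : List (List String)) ++
        [[pvEntry (PySem.List.pyGetD dl ((i : Nat) : Int) "") (PySem.List.pyGetD sl ((i : Nat) : Int) "")
          (PySem.List.pyGetD pl ((i : Nat) : Int) 0)]] from rfl]
  rw [pvLoopA_eq_foldl, foldl_step_glue, List.nil_append, pvGlue_head]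
  rw [show (pvKey (PySem.List.pyGetD dl ((i : Nat) : Int) ""),
        pvEntry (PySem.List.pyGetD dl ((i : Nat) : Int) "") (PySem.List.pyGetD sl ((i : Nat) : Int) "")
          (PySem.List.pyGetD pl ((i : Nat) : Int) 0)) :: pvPairs dl pl sl f (i + 1) =
      pvPairs dl pl sl (f + 1) i from rfl]

-- every pair list starting with key k has runs starting with (k, e :: tail)
theorem pvRuns_cons (k e : String) (ps : List (String × String)) :
    ∃ tl rs, pvRuns ((k, e) :: ps) = (k, e :: tl) :: rs := by
  rw [pvRuns]
  cases pvRuns ps with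
  | nil => exact ⟨[], [], rfl⟩
  | cons p rs' =>
    obtain ⟨k', es⟩ := p
    by_cases hkk : k = k'
    · exact ⟨es, rs', by simp [hkk]⟩
    · exact ⟨[], (k', es) :: rs', by simp [hkk]⟩

-- the " "-joined ","-joined runs ARE the separator-joined string
theorem runs_join_eq_sepTail :
    ∀ (ps : List (String × String)) (k e : String),
      PySem.Str.join " " ((pvRuns ((k, e) :: ps)).map (fun r => PySem.Str.join "," r.2)) =
        e ++ pvSepTail k ps := by
  intro ps
  induction ps with
  | nil =>
    intro k e
    simp only [pvRuns, pvSepTail, List.map]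
    rw [strjoin_singleton, strjoin_singleton]
    exact String.append_empty.symm
  | cons p rest ih =>
    intro k e
    obtain ⟨k2, e2⟩ := p
    obtain ⟨tl, rs, hr⟩ := pvRuns_cons k2 e2 rest
    by_cases hkk : k = k2
    · subst hkk
      have hrr : pvRuns ((k, e) :: (k, e2) :: rest) = (k, e :: e2 :: tl) :: rs := by
        rw [pvRuns, hr]; simp
      rw [hrr]
      have ihx := ih k e2
      rw [hr] at ihx
      simp only [List.map] at ihx ⊢
      rw [show PySem.Str.join "," (e :: e2 :: tl) = e ++ ("," ++ PySem.Str.join "," (e2 :: tl)) by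
            rw [strjoin_cons_cons]; exact String.append_assoc,
          strjoin_absorb, strjoin_absorb, ihx, pvSepTail]
      simp
    · have hrr : pvRuns ((k, e) :: (k2, e2) :: rest) = (k, [e]) :: (k2, e2 :: tl) :: rs := by
        rw [pvRuns, hr]; simp [hkk]
      rw [hrr]
      have ihy := ih k2 e2
      rw [hr] at ihy
      simp only [List.map] at ihy ⊢
      rw [strjoin_cons_cons, strjoin_singleton, ihy, pvSepTail]
      have : ¬ k2 = k := fun h => hkk h.symm
      simp [this, String.append_assoc]

-- B's zipped separator build computes pvSepTail
theorem zip_seps_eq_sepTail :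
    ∀ (ps : List (String × String)) (r : String),
      PySem.Str.join ""
        (((((ps.map Prod.fst).zip (r :: ps.map Prod.fst)).map
            (fun p => if p.1 ≠ p.2 then " " else ",")).zip (ps.map Prod.snd)).map
          (fun p => p.1 ++ p.2)) = pvSepTail r ps := by
  intro ps
  induction ps with
  | nil => intro r; simp [pvSepTail, strjoin_nil]
  | cons p rest ih =>
    intro r
    obtain ⟨k, e⟩ := p
    simp only [List.map, List.zip_cons_cons]
    rw [strjoin_empty_cons, ih k, pvSepTail]
    simp [String.append_assoc]

-- pvPairs as a map over List.range
theorem pvPairs_eq_map (dl : List String) (pl : List Int) (sl : List String) :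
    ∀ (f i : Nat),
      pvPairs dl pl sl f i = (List.range f).map (fun t =>
        (pvKey (PySem.List.pyGetD dl ((i + t : Nat) : Int) ""),
         pvEntry (PySem.List.pyGetD dl ((i + t : Nat) : Int) "")
           (PySem.List.pyGetD sl ((i + t : Nat) : Int) "")
           (PySem.List.pyGetD pl ((i + t : Nat) : Int) 0))) := by
  intro f
  induction f with
  | zero => intro i; rfl
  | succ m ih =>
    intro i
    rw [pvPairs, ih (i + 1), List.range_succ_eq_map, List.map_cons, List.map_map]
    refine congrArg₂ _ (by simp) ?_
    refine List.map_congr_left fun t _ => ?_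
    have : i + 1 + t = i + (t + 1) := by omega
    simp [Function.comp, this]

-- B, on a nonempty srr list, is the head entry plus the separator-joined tail
theorem alt_eq_head_sepTail (dl : List String) (pl : List Int) (s : String) (sl' : List String) :
    get_condition_str_rockhopper_alt dl pl (s :: sl') =
      pvEntry (PySem.List.pyGetD dl ((0 : Nat) : Int) "")
          (PySem.List.pyGetD (s :: sl') ((0 : Nat) : Int) "")
          (PySem.List.pyGetD pl ((0 : Nat) : Int) 0) ++
        pvSepTail (pvKey (PySem.List.pyGetD dl ((0 : Nat) : Int) ""))
          ((List.range sl'.length).map (fun t =>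
            (pvKey (PySem.List.pyGetD dl ((t + 1 : Nat) : Int) ""),
             pvEntry (PySem.List.pyGetD dl ((t + 1 : Nat) : Int) "")
               (PySem.List.pyGetD (s :: sl') ((t + 1 : Nat) : Int) "")
               (PySem.List.pyGetD pl ((t + 1 : Nat) : Int) 0)))) := by
  simp only [get_condition_str_rockhopper_alt, List.length_cons, PySem.List.pyRange_zero_nat,
    List.map_map, PySem.List.slice_from_one, pvEntryB_eq, List.range_succ_eq_map, List.map_cons,
    List.tail_cons]
  rw [PySem.List.pyGetD_zero_cons, ← zip_seps_eq_sepTail]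
  simp [Function.comp_def]

-- ===== VERDICT =====
theorem get_condition_str_rockhopper_spec : Claim_equal_get_condition_str_rockhopper := by
  intro dl pl sl _hdom hpre
  unfold Spec_get_condition_str_rockhopper
  cases sl with
  | nil => rfl
  | cons s sl' =>
    obtain ⟨_, _, hkey⟩ := hpre
    have hk0 : pvKey (PySem.List.pyGetD dl (((0 : Nat) : Nat) : Int) "") ≠ "" := by
      unfold pvKey
      rw [Nat.cast_zero, PySem.List.pyGetD_zero]
      exact hkey (List.cons_ne_nil s sl')
    have hps : pvPairs dl pl (s :: sl') (sl'.length + 1) 0 =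
        (pvKey (PySem.List.pyGetD dl ((0 : Nat) : Int) ""),
         pvEntry (PySem.List.pyGetD dl ((0 : Nat) : Int) "")
           (PySem.List.pyGetD (s :: sl') ((0 : Nat) : Int) "")
           (PySem.List.pyGetD pl ((0 : Nat) : Int) 0)) ::
        (List.range sl'.length).map (fun t =>
          (pvKey (PySem.List.pyGetD dl ((t + 1 : Nat) : Int) ""),
           pvEntry (PySem.List.pyGetD dl ((t + 1 : Nat) : Int) "")
             (PySem.List.pyGetD (s :: sl') ((t + 1 : Nat) : Int) "")
             (PySem.List.pyGetD pl ((t + 1 : Nat) : Int) 0))) := by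
      rw [pvPairs_eq_map dl pl (s :: sl') (sl'.length + 1) 0, List.range_succ_eq_map,
        List.map_cons, List.map_map]
      refine congrArg₂ _ (by simp) ?_
      refine List.map_congr_left fun t _ => ?_
      have : 0 + (t + 1) = t + 1 := by omega
      simp [Function.comp, this]
    rw [alt_eq_head_sepTail dl pl s sl']
    simp only [get_condition_str_rockhopper, List.length_cons]
    rw [pvLoop_runs dl pl (s :: sl') sl'.length 0 "" hk0, hps, List.map_map]
    simpa [Function.comp_def] using
      runs_join_eq_sepTail
        ((List.range sl'.length).map (fun t =>
          (pvKey (PySem.List.pyGetD dl ((t + 1 : Nat) : Int) ""),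
           pvEntry (PySem.List.pyGetD dl ((t + 1 : Nat) : Int) "")
             (PySem.List.pyGetD (s :: sl') ((t + 1 : Nat) : Int) "")
             (PySem.List.pyGetD pl ((t + 1 : Nat) : Int) 0))))
        (pvKey (PySem.List.pyGetD dl ((0 : Nat) : Int) ""))
        (pvEntry (PySem.List.pyGetD dl ((0 : Nat) : Int) "")
          (PySem.List.pyGetD (s :: sl') ((0 : Nat) : Int) "")
          (PySem.List.pyGetD pl ((0 : Nat) : Int) 0))

def get_condition_str_rockhopper_raises : Claim_raises_get_condition_str_rockhopper := by
  unfold Claim_raises_get_condition_str_rockhopper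
  refine ⟨?_, by decide⟩
  intro dl pl sl _ hr hpre
  exact (hpre.2.2 hr.2.2.1) hr.2.2.2
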